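-- pv_equiv track=rewrite | github.com/jingcshi/ICON | experiments/data_wrangling/build_ret_data.py | cluster_sample
-- ===== SOURCE A (Python) =====
-- from itertools import combinations
--
-- def cluster_sample(n:int,cover_rate:int=2):
--     if n < 2:
--         raise ValueError('At least 2 items are needed for contrastive sampling.')
--     pairs = list(combinations(list(range(n)), 2))
--     ratio, remainder = cover_rate // (n-1), cover_rate%(n-1)
--     fullcover = [pair for pair in pairs for _ in range(ratio)]
--     subcover = [(i,j) for (i,j) in pairs if min((i-j)%n,(j-i)%n) <= (remainder // 2)]
--     if remainder%2 != 0 and n%2 == 0: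
--         subcover = subcover + [(i,j) for (i,j) in pairs if (i-j)%n == (n // 2)]
--     return fullcover + subcover
-- ===== SOURCE B (Python) =====
-- def cluster_sample(n: int, cover_rate: int = 2):
--     # Directly enumerates only the pairs inside the circular-distance band
--     # (plus the antipodal diagonal), in lex order, instead of scanning all pairs.
--     if n < 2:
--         raise ValueError('At least 2 items are needed for contrastive sampling.')
--     ratio, remainder = divmod(cover_rate, n - 1)
--     r2 = remainder // 2
--     out = []
--     if ratio > 0:
--         for i in range(n):
--             for j in range(i + 1, n):
--                 out += [(i, j)] * ratio
--     for i in range(n):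
--         for j in range(i + 1, min(n, i + r2 + 1)):
--             out.append((i, j))
--         for j in range(n + i - r2, n):
--             out.append((i, j))
--     if remainder % 2 == 1 and n % 2 == 0:
--         h = n // 2
--         for i in range(h):
--             out.append((i, i + h))
--     return out
-- ===== Notes on version B (the rewrite author's own statement) =====
-- stated objective: faster
-- what changed: Instead of materialising all C(n,2) pairs and filtering them by circular distance (and again for the antipodal diagonal), B enumerates directly, in the same lex order, only the pairs inside the distance band and on the diagonal, and skips the full-cover pass entirely when ratio is 0.
import Mathlib
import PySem

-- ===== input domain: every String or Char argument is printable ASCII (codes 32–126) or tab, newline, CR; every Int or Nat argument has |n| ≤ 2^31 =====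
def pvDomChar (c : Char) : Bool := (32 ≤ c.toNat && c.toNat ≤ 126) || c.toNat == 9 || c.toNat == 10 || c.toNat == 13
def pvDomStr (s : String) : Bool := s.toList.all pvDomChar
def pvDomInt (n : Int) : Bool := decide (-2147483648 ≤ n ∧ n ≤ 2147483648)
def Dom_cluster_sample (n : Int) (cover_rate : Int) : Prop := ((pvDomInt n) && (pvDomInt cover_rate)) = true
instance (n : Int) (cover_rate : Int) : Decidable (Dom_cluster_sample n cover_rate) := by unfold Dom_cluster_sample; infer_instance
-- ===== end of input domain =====

-- B enumerates only the pairs inside the circular-distance band (plus the antipodal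
-- diagonal) directly, in lex order, instead of filtering all O(n^2) pairs.

-- ===== PORT A =====
-- list(combinations(range(n), 2)) in lex order, as a list of pairs
def cluster_sample (n : Int) (cover_rate : Int) : List (Int × Int) :=
  let pairs := (PySem.List.pyRange 0 n 1).flatMap
    (fun i => (PySem.List.pyRange (i + 1) n 1).map (fun j => (i, j)))
  let ratio := PySem.Int.floordiv cover_rate (n - 1)
  let remainder := PySem.Int.mod cover_rate (n - 1)
  let fullcover := pairs.flatMap (fun p => (PySem.List.pyRange 0 ratio 1).map (fun _ => p))
  let subcover := pairs.filter (fun p =>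
    decide (min (PySem.Int.mod (p.1 - p.2) n) (PySem.Int.mod (p.2 - p.1) n)
            ≤ PySem.Int.floordiv remainder 2))
  let subcover2 :=
    if PySem.Int.mod remainder 2 ≠ 0 ∧ PySem.Int.mod n 2 = 0 then
      subcover ++ pairs.filter (fun p =>
        decide (PySem.Int.mod (p.1 - p.2) n = PySem.Int.floordiv n 2))
    else subcover
  fullcover ++ subcover2

-- ===== PORT B =====
def cluster_sample_alt (n : Int) (cover_rate : Int) : List (Int × Int) :=
  let ratio := PySem.Int.floordiv cover_rate (n - 1)
  let remainder := PySem.Int.mod cover_rate (n - 1)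
  let r2 := PySem.Int.floordiv remainder 2
  let full :=
    if 0 < ratio then
      (PySem.List.pyRange 0 n 1).flatMap (fun i =>
        (PySem.List.pyRange (i + 1) n 1).flatMap (fun j =>
          PySem.List.pyRepeat [(i, j)] ratio))
    else []
  let band := (PySem.List.pyRange 0 n 1).flatMap (fun i =>
    (PySem.List.pyRange (i + 1) (min n (i + r2 + 1)) 1).map (fun j => (i, j)) ++
    (PySem.List.pyRange (n + i - r2) n 1).map (fun j => (i, j)))
  let mid :=
    if PySem.Int.mod remainder 2 = 1 ∧ PySem.Int.mod n 2 = 0 then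
      (PySem.List.pyRange 0 (PySem.Int.floordiv n 2) 1).map
        (fun i => (i, i + PySem.Int.floordiv n 2))
    else []
  full ++ (band ++ mid)

-- ===== PRECONDITION & SPEC =====
-- Pre_ excludes exactly n < 2, where A raises ValueError.
def Pre_cluster_sample (n : Int) (cover_rate : Int) : Prop := 2 ≤ n
instance (n : Int) (cover_rate : Int) : Decidable (Pre_cluster_sample n cover_rate) := by
  unfold Pre_cluster_sample; infer_instance

def pvWitness_cluster_sample : Int × Int := (4, 5)

def Spec_cluster_sample (n : Int) (cover_rate : Int) (out : List (Int × Int)) : Prop :=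
  out = cluster_sample_alt n cover_rate
instance (n : Int) (cover_rate : Int) (out : List (Int × Int)) :
    Decidable (Spec_cluster_sample n cover_rate out) := by
  unfold Spec_cluster_sample; infer_instance

-- ===== CLAIM (what is proved, stated in full; the proofs are below) =====
def Claim_equal_cluster_sample : Prop := ∀ (n : Int) (cover_rate : Int),
  Dom_cluster_sample n cover_rate → Pre_cluster_sample n cover_rate →
  Spec_cluster_sample n cover_rate (cluster_sample n cover_rate)

-- ===== LEMMAS AND PROOFS =====

-- an Int range mapped to a constant is replicate
lemma range_map_const {α : Type} (r : Int) (p : α) :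
    (PySem.List.pyRange 0 r 1).map (fun _ => p) = List.replicate r.toNat p := by
  rw [List.eq_replicate_iff]
  simp [PySem.List.length_pyRange_one]

-- filtering an Int range by "j ≤ c or d ≤ j" keeps exactly the two edge sub-ranges
lemma filter_band (a b c d : Int) (h1 : a ≤ c + 1) (h2 : c + 1 ≤ d) :
    (PySem.List.pyRange a b 1).filter (fun j => decide (j ≤ c ∨ d ≤ j)) =
      PySem.List.pyRange a (min b (c + 1)) 1 ++ PySem.List.pyRange d b 1 := by
  have sl : ((PySem.List.pyRange a b 1).filter (fun j => decide (j ≤ c ∨ d ≤ j))).Pairwise (· < ·) :=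
    List.Pairwise.sublist List.filter_sublist (PySem.List.pairwise_lt_pyRange_one _ _)
  have sr : (PySem.List.pyRange a (min b (c + 1)) 1 ++ PySem.List.pyRange d b 1).Pairwise (· < ·) := by
    rw [List.pairwise_append]
    refine ⟨PySem.List.pairwise_lt_pyRange_one _ _, PySem.List.pairwise_lt_pyRange_one _ _, ?_⟩
    intro x hx y hy
    rw [PySem.List.mem_pyRange_one] at hx hy
    omega
  refine List.Perm.eq_of_pairwise (fun a b _ _ h1 h2 => le_antisymm h1 h2) (sl.imp le_of_lt) (sr.imp le_of_lt) ?_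
  refine (List.perm_ext_iff_of_nodup (sl.imp ne_of_lt) (sr.imp ne_of_lt)).mpr ?_
  intro x
  simp only [List.mem_filter, List.mem_append, PySem.List.mem_pyRange_one, decide_eq_true_eq]
  omega

-- filtering an Int range for a single value at least its lower bound
lemma filter_eq_val (a b v : Int) (hv : a ≤ v) :
    (PySem.List.pyRange a b 1).filter (fun j => decide (j = v)) =
      if v < b then [v] else [] := by
  have sl : ((PySem.List.pyRange a b 1).filter (fun j => decide (j = v))).Pairwise (· < ·) :=
    List.Pairwise.sublist List.filter_sublist (PySem.List.pairwise_lt_pyRange_one _ _)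
  have sr : (if v < b then [v] else ([] : List Int)).Pairwise (· < ·) := by
    split_ifs <;> simp
  refine List.Perm.eq_of_pairwise (fun a b _ _ h1 h2 => le_antisymm h1 h2) (sl.imp le_of_lt) (sr.imp le_of_lt) ?_
  refine (List.perm_ext_iff_of_nodup (sl.imp ne_of_lt) (sr.imp ne_of_lt)).mpr ?_
  intro x
  split_ifs with h <;>
    simp only [List.mem_filter, PySem.List.mem_pyRange_one, decide_eq_true_eq,
      List.mem_singleton, List.not_mem_nil, iff_false, not_and] <;>
    omega

-- circular-distance mods for a pair i < j inside range(n)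
lemma mod_sub_lt (n i j : Int) (h0 : 0 ≤ i) (h1 : i < j) (h2 : j < n) :
    PySem.Int.mod (j - i) n = j - i := by
  rw [PySem.Int.mod_eq_emod_of_pos (by omega)]
  exact Int.emod_eq_of_lt (by omega) (by omega)

lemma mod_sub_gt (n i j : Int) (h0 : 0 ≤ i) (h1 : i < j) (h2 : j < n) :
    PySem.Int.mod (i - j) n = n - (j - i) := by
  rw [PySem.Int.mod_eq_emod_of_pos (by omega)]
  have : i - j + n = n - (j - i) := by ring
  calc (i - j) % n = (i - j + n) % n := Int.emod_eq_add_self_emod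
    _ = i - j + n := Int.emod_eq_of_lt (by omega) (by omega)
    _ = n - (j - i) := this

-- A's filter of all pairs by circular distance ≤ r2 equals B's direct band enumeration
lemma band_eq (n r2 : Int) (hr0 : 0 ≤ r2) (hrn : 2 * r2 ≤ n - 2) :
    ((PySem.List.pyRange 0 n 1).flatMap
        (fun i => (PySem.List.pyRange (i + 1) n 1).map (fun j => (i, j)))).filter
      (fun p => decide (min (PySem.Int.mod (p.1 - p.2) n) (PySem.Int.mod (p.2 - p.1) n) ≤ r2)) =
    (PySem.List.pyRange 0 n 1).flatMap (fun i =>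
      (PySem.List.pyRange (i + 1) (min n (i + r2 + 1)) 1).map (fun j => (i, j)) ++
      (PySem.List.pyRange (n + i - r2) n 1).map (fun j => (i, j))) := by
  rw [List.filter_flatMap]
  refine List.flatMap_congr ?_
  intro i hi
  rw [PySem.List.mem_pyRange_one] at hi
  rw [List.filter_map]
  have hcong : (PySem.List.pyRange (i + 1) n 1).filter
      ((fun p : Int × Int => decide (min (PySem.Int.mod (p.1 - p.2) n) (PySem.Int.mod (p.2 - p.1) n) ≤ r2)) ∘ (fun j => (i, j))) =
      (PySem.List.pyRange (i + 1) n 1).filter (fun j => decide (j ≤ i + r2 ∨ n + i - r2 ≤ j)) := by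
    refine List.filter_congr ?_
    intro j hj
    rw [PySem.List.mem_pyRange_one] at hj
    simp only [Function.comp]
    rw [mod_sub_gt n i j (by omega) (by omega) (by omega),
        mod_sub_lt n i j (by omega) (by omega) (by omega)]
    rw [decide_eq_decide, min_le_iff]
    omega
  rw [hcong, filter_band (i + 1) n (i + r2) (n + i - r2) (by omega) (by omega), List.map_append]

-- A's filter of all pairs by "(i-j) % n == n//2" equals B's antipodal diagonal
lemma mid_eq (n : Int) (hn : 2 ≤ n) (heven : n % 2 = 0) :
    ((PySem.List.pyRange 0 n 1).flatMap
        (fun i => (PySem.List.pyRange (i + 1) n 1).map (fun j => (i, j)))).filter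
      (fun p => decide (PySem.Int.mod (p.1 - p.2) n = PySem.Int.floordiv n 2)) =
    (PySem.List.pyRange 0 (PySem.Int.floordiv n 2) 1).map
      (fun i => (i, i + PySem.Int.floordiv n 2)) := by
  have hfd : PySem.Int.floordiv n 2 = n / 2 := PySem.Int.floordiv_eq_ediv_of_pos (by omega)
  rw [List.filter_flatMap, hfd]
  have step : ∀ i ∈ PySem.List.pyRange 0 n 1,
      ((PySem.List.pyRange (i + 1) n 1).map (fun j => (i, j))).filter
        (fun p => decide (PySem.Int.mod (p.1 - p.2) n = n / 2)) =
      if i + n / 2 < n then [(i, i + n / 2)] else [] := by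
    intro i hi
    rw [PySem.List.mem_pyRange_one] at hi
    rw [List.filter_map]
    have hcong : (PySem.List.pyRange (i + 1) n 1).filter
        ((fun p : Int × Int => decide (PySem.Int.mod (p.1 - p.2) n = n / 2)) ∘ (fun j => (i, j))) =
        (PySem.List.pyRange (i + 1) n 1).filter (fun j => decide (j = i + n / 2)) := by
      refine List.filter_congr ?_
      intro j hj
      rw [PySem.List.mem_pyRange_one] at hj
      simp only [Function.comp]
      rw [mod_sub_gt n i j (by omega) (by omega) (by omega)]
      rw [decide_eq_decide]
      omega
    rw [hcong, filter_eq_val (i + 1) n (i + n / 2) (by omega)]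
    split_ifs <;> simp
  rw [List.flatMap_congr step,
      PySem.List.pyRange_one_append 0 (n / 2) n (by omega) (by omega), List.flatMap_append]
  have left : (PySem.List.pyRange 0 (n / 2) 1).flatMap
      (fun i => if i + n / 2 < n then [(i, i + n / 2)] else []) =
      (PySem.List.pyRange 0 (n / 2) 1).map (fun i => (i, i + n / 2)) := by
    rw [List.flatMap_congr (g := fun i => [(i, i + n / 2)]) ?_]
    · exact List.map_eq_flatMap.symm
    · intro i hi
      rw [PySem.List.mem_pyRange_one] at hi
      rw [if_pos (by omega)]
  have right : (PySem.List.pyRange (n / 2) n 1).flatMap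
      (fun i => if i + n / 2 < n then [(i, i + n / 2)] else []) = [] := by
    rw [List.flatMap_congr (g := fun _ => ([] : List (Int × Int))) ?_]
    · simp
    · intro i hi
      rw [PySem.List.mem_pyRange_one] at hi
      rw [if_neg (by omega)]
  rw [left, right, List.append_nil]

-- ===== VERDICT (by name: the statement is the Claim_ definition above) =====
theorem cluster_sample_spec : Claim_equal_cluster_sample := by
  intro n cr _ hpre
  have hn : 2 ≤ n := hpre
  show cluster_sample n cr = cluster_sample_alt n cr
  simp only [cluster_sample, cluster_sample_alt]
  have hrem0 : 0 ≤ PySem.Int.mod cr (n - 1) := PySem.Int.mod_nonneg cr (by omega)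
  have hremlt : PySem.Int.mod cr (n - 1) < n - 1 := PySem.Int.mod_lt cr (by omega)
  set rem := PySem.Int.mod cr (n - 1) with hrdef
  have hr2 : PySem.Int.floordiv rem 2 = rem / 2 := PySem.Int.floordiv_eq_ediv_of_pos (by omega)
  have hrm2 : PySem.Int.mod rem 2 = rem % 2 := PySem.Int.mod_eq_emod_of_pos (by omega)
  have hnm2 : PySem.Int.mod n 2 = n % 2 := PySem.Int.mod_eq_emod_of_pos (by omega)
  set ratio := PySem.Int.floordiv cr (n - 1) with hratdef
  -- fullcover = full
  have hfull : ((PySem.List.pyRange 0 n 1).flatMap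
        (fun i => (PySem.List.pyRange (i + 1) n 1).map (fun j => (i, j)))).flatMap
        (fun p => (PySem.List.pyRange 0 ratio 1).map (fun _ => p)) =
      (if 0 < ratio then
        (PySem.List.pyRange 0 n 1).flatMap (fun i =>
          (PySem.List.pyRange (i + 1) n 1).flatMap (fun j =>
            PySem.List.pyRepeat [(i, j)] ratio))
      else []) := by
    by_cases hr : 0 < ratio
    · rw [if_pos hr]
      simp only [List.flatMap_assoc, PySem.List.pyRepeat_singleton, range_map_const,
        List.flatMap_map]
    · rw [if_neg hr]
      have : ratio.toNat = 0 := Int.toNat_eq_zero.mpr (by omega)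
      simp [this]
  -- band
  have hband := band_eq n (rem / 2) (by omega) (by omega)
  rw [← hr2] at hband
  -- conditions agree
  have hcond : (PySem.Int.mod rem 2 ≠ 0 ∧ PySem.Int.mod n 2 = 0) ↔
      (PySem.Int.mod rem 2 = 1 ∧ PySem.Int.mod n 2 = 0) := by
    rw [hrm2, hnm2]; omega
  rw [hfull, hband]
  by_cases hc : PySem.Int.mod rem 2 = 1 ∧ PySem.Int.mod n 2 = 0
  · rw [if_pos (hcond.mpr hc), if_pos hc, mid_eq n hn (by rw [← hnm2]; exact hc.2)]
  · rw [if_neg (fun h => hc (hcond.mp h)), if_neg hc, List.append_nil]
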